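-- pv_equiv track=rewrite | github.com/Ashiq-am/Path-of-Python | 3.Data Types/Arrays Set 1 and Set 2/Prefix Sum/Difference summation with Array index matching/Difference summation with Array index matching.py | score_of_sorted_array
-- ===== SOURCE A (Python) =====
-- def score_of_sorted_array(A, B, N, M):
-- 	# Initializing suffix sum and prefix sum arrays
-- 	sufSum = [0] * N
-- 	preSum = [0] * N
--
-- 	# Computing suffix sum array
-- 	sufSum[N - 1] = A[N - 1]
-- 	for i in range(N - 2, -1, -1):
-- 		sufSum[i] = sufSum[i + 1] + A[i]
--
-- 	# Computing prefix sum array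
-- 	preSum[0] = A[0]
-- 	for i in range(1, N):
-- 		preSum[i] = preSum[i - 1] + A[i]
--
-- 	res = 0
-- 	for i in range(M):
-- 		# Adding suffix sum of last B[i] elements
-- 		res += sufSum[B[i]]
-- 		# Subtracting prefix sum of first N-B[i]-1 elements
-- 		res -= preSum[N - B[i] - 1]
--
-- 	return res
-- ===== SOURCE B (Python) =====
-- def score_of_sorted_array(A, B, N, M):
--     # Exchange the order of summation: instead of evaluating each query
--     # against precomputed prefix/suffix sums of A, histogram the query
--     # values, turn the histogram into cumulative counts C (C[t] = number
--     # of queries with value <= t), and make ONE weighted pass over A: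
--     # element A[j] contributes with coefficient C[j] - C[N-1-j].
--     cnt = [0] * N
--     for i in range(M):
--         cnt[B[i]] += 1
--     C = []
--     c = 0
--     for v in cnt:
--         c += v
--         C.append(c)
--     res = 0
--     for j in range(N):
--         res += A[j] * (C[j] - C[N - 1 - j])
--     return res
-- ===== Notes on version B (the rewrite author's own statement) =====
-- stated objective: alternative
-- what changed: B exchanges the order of summation: instead of A's prefix/suffix sums of the array with a per-query lookup loop, B builds a histogram of the query values, turns it into cumulative query counts C, and computes the result in one weighted pass over A where element A[j] carries the coefficient C[j]-C[N-1-j]; no prefix sums of A are ever formed.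
import Mathlib
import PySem

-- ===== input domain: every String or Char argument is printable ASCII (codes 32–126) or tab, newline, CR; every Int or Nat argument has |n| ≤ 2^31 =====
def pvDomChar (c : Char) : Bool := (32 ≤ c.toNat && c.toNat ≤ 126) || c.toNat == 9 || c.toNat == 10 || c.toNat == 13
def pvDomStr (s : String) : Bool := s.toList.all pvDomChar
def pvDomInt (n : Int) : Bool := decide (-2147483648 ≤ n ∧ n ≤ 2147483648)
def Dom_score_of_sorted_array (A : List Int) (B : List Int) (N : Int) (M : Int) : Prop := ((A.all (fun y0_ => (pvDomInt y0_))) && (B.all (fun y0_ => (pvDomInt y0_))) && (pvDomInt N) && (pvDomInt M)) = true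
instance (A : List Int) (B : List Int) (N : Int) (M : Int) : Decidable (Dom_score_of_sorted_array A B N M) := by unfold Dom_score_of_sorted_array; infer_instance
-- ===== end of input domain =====

-- B exchanges the order of summation: it histograms the query values, forms cumulative
-- query counts, and does one weighted pass over A (coefficient C[j] - C[N-1-j] per element)
-- instead of A's prefix/suffix sums of the array with a per-query lookup loop
-- (objective: alternative, same asymptotic cost).

-- ===== PORT A =====
-- literal transliteration of A: [0]*N arrays, suffix-sum fill right-to-left,
-- prefix-sum fill left-to-right, then one loop over the M queries.
def score_of_sorted_array (A : List Int) (B : List Int) (N : Int) (M : Int) : Int :=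
  let sufSum0 := PySem.List.pyRepeat [(0 : Int)] N
  let preSum0 := PySem.List.pyRepeat [(0 : Int)] N
  let sufSum1 := PySem.List.pySetD sufSum0 (N - 1) (PySem.List.pyGetD A (N - 1) 0)
  let sufSum := (PySem.List.pyRange (N - 2) (-1) (-1)).foldl
      (fun s i => PySem.List.pySetD s i (PySem.List.pyGetD s (i + 1) 0 + PySem.List.pyGetD A i 0)) sufSum1
  let preSum1 := PySem.List.pySetD preSum0 0 (PySem.List.pyGetD A 0 0)
  let preSum := (PySem.List.pyRange 1 N).foldl
      (fun p i => PySem.List.pySetD p i (PySem.List.pyGetD p (i - 1) 0 + PySem.List.pyGetD A i 0)) preSum1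
  (PySem.List.pyRange 0 M).foldl
      (fun r i =>
        let b := PySem.List.pyGetD B i 0
        r + PySem.List.pyGetD sufSum b 0 - PySem.List.pyGetD preSum (N - b - 1) 0) 0

-- ===== PORT B =====
-- literal transliteration of Source B: histogram cnt of the M query values ([0]*N plus
-- cnt[B[i]] += 1), cumulative counts C built by appending a running sum, then one
-- weighted loop over j in range(N) adding A[j] * (C[j] - C[N-1-j]).
def score_of_sorted_array_alt (A : List Int) (B : List Int) (N : Int) (M : Int) : Int :=
  let cnt := (PySem.List.pyRange 0 M).foldl
      (fun c i =>
        let b := PySem.List.pyGetD B i 0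
        PySem.List.pySetD c b (PySem.List.pyGetD c b 0 + 1))
      (PySem.List.pyRepeat [(0 : Int)] N)
  let Cc := cnt.foldl (fun (p : List Int × Int) v => (p.1 ++ [p.2 + v], p.2 + v)) ([], 0)
  (PySem.List.pyRange 0 N).foldl
      (fun r j => r + PySem.List.pyGetD A j 0 *
        (PySem.List.pyGetD Cc.1 j 0 - PySem.List.pyGetD Cc.1 (N - j - 1) 0)) 0

-- ===== PRECONDITION & SPEC =====
-- Exactly where the Python A returns: it needs A[N-1] (so 1 ≤ N ≤ len(A)), reads B[i]
-- for i < M (so M ≤ len(B)), and each query b must satisfy 0 ≤ b < N: sufSum[b] demands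
-- -N ≤ b < N, and preSum[N-b-1] then demands b ≥ 0 (for b < 0 the index N-b-1 ≥ N raises).
def Pre_score_of_sorted_array (A : List Int) (B : List Int) (N : Int) (M : Int) : Prop :=
  1 ≤ N ∧ N ≤ A.length ∧ M ≤ B.length ∧ ∀ b ∈ B.take M.toNat, 0 ≤ b ∧ b < N
instance (A : List Int) (B : List Int) (N : Int) (M : Int) : Decidable (Pre_score_of_sorted_array A B N M) := by unfold Pre_score_of_sorted_array; infer_instance

def pvWitness_score_of_sorted_array : List Int × List Int × Int × Int := ([1, 2, 3], [0, 2, 1], 3, 3)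

def Spec_score_of_sorted_array (A : List Int) (B : List Int) (N : Int) (M : Int) (out : Int) : Prop := out = score_of_sorted_array_alt A B N M
instance (A : List Int) (B : List Int) (N : Int) (M : Int) (out : Int) : Decidable (Spec_score_of_sorted_array A B N M out) := by unfold Spec_score_of_sorted_array; infer_instance

-- ===== CLAIM (what is proved, stated in full; the proofs are below) =====
def Claim_equal_score_of_sorted_array : Prop := ∀ (A : List Int) (B : List Int) (N : Int) (M : Int), Dom_score_of_sorted_array A B N M → Pre_score_of_sorted_array A B N M → Spec_score_of_sorted_array A B N M (score_of_sorted_array A B N M)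

-- ===== LEMMAS AND PROOFS =====

-- sum of the first k elements of A
def pvPre (A : List Int) (k : Nat) : Int := (A.take k).sum

-- the contribution of one query b (0 ≤ b < n): suffix sum from b minus prefix sum of n-b elements
def pvG (A : List Int) (n : Nat) (b : Int) : Int :=
  (pvPre A n - pvPre A b.toNat) - pvPre A (n - b.toNat)

-- number of queries with value ≤ t
def pvK (Bq : List Int) (t : Int) : Int := (Bq.countP (fun b => decide (b ≤ t)) : Int)

-- the named sub-computations of the two ports (definitionally equal to the ports' pieces)
def pvSufArr (A : List Int) (N : Int) : List Int :=
  (PySem.List.pyRange (N - 2) (-1) (-1)).foldl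
    (fun s i => PySem.List.pySetD s i (PySem.List.pyGetD s (i + 1) 0 + PySem.List.pyGetD A i 0))
    (PySem.List.pySetD (PySem.List.pyRepeat [(0 : Int)] N) (N - 1) (PySem.List.pyGetD A (N - 1) 0))

def pvPreArr (A : List Int) (N : Int) : List Int :=
  (PySem.List.pyRange 1 N).foldl
    (fun p i => PySem.List.pySetD p i (PySem.List.pyGetD p (i - 1) 0 + PySem.List.pyGetD A i 0))
    (PySem.List.pySetD (PySem.List.pyRepeat [(0 : Int)] N) 0 (PySem.List.pyGetD A 0 0))

def pvCntArr (B : List Int) (N M : Int) : List Int :=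
  (PySem.List.pyRange 0 M).foldl
    (fun c i =>
      PySem.List.pySetD c (PySem.List.pyGetD B i 0)
        (PySem.List.pyGetD c (PySem.List.pyGetD B i 0) 0 + 1))
    (PySem.List.pyRepeat [(0 : Int)] N)

theorem pv_A_unfold (A B : List Int) (N M : Int) :
    score_of_sorted_array A B N M
      = (PySem.List.pyRange 0 M).foldl
          (fun r i => r + PySem.List.pyGetD (pvSufArr A N) (PySem.List.pyGetD B i 0) 0
            - PySem.List.pyGetD (pvPreArr A N) (N - PySem.List.pyGetD B i 0 - 1) 0) 0 := rfl

theorem pv_B_unfold (A B : List Int) (N M : Int) :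
    score_of_sorted_array_alt A B N M
      = (PySem.List.pyRange 0 N).foldl
          (fun r j => r + PySem.List.pyGetD A j 0 *
            (PySem.List.pyGetD ((pvCntArr B N M).foldl
                (fun (p : List Int × Int) v => (p.1 ++ [p.2 + v], p.2 + v)) ([], 0)).1 j 0
             - PySem.List.pyGetD ((pvCntArr B N M).foldl
                (fun (p : List Int × Int) v => (p.1 ++ [p.2 + v], p.2 + v)) ([], 0)).1 (N - j - 1) 0)) 0 := rfl

theorem pvPre_zero (A : List Int) : pvPre A 0 = 0 := rfl

theorem pvPre_succ (A : List Int) (k : Nat) (hk : k < A.length) :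
    pvPre A (k + 1) = pvPre A k + A[k] := by
  unfold pvPre
  rw [List.sum_take_succ]

theorem pv_pyRange_zero_toNat (M : Int) :
    PySem.List.pyRange 0 M = PySem.List.pyRange 0 ((M.toNat : Nat) : Int) := by
  by_cases h : 0 ≤ M
  · rw [Int.toNat_of_nonneg h]
  · rw [PySem.List.pyRange_one_eq_nil (by omega), PySem.List.pyRange_one_eq_nil (by omega)]

-- fold over range(0, m) reading B[i] = fold over B.take m
theorem pv_fold_take {β : Type} (B : List Int) (m : Nat) (hm : m ≤ B.length)
    (f : β → Int → β) (init : β) :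
    (PySem.List.pyRange 0 (m : Int)).foldl (fun acc i => f acc (PySem.List.pyGetD B i 0)) init
      = (B.take m).foldl f init := by
  have hlen : (B.take m).length = m := by simp [List.length_take]; omega
  have h := PySem.List.foldl_pyRange_zero_pyGetD' (B.take m) 0 f init
  rw [hlen] at h
  rw [← h]
  apply PySem.List.foldl_congr_mem
  intro acc x hx
  rw [PySem.List.mem_pyRange_one] at hx
  have h1 : PySem.List.pyGetD B x 0 = B[x.toNat] :=
    PySem.List.pyGetD_eq_getElem B 0 hx.1 (by omega)
  have h2 : PySem.List.pyGetD (B.take m) x 0 = (B.take m)[x.toNat]'(by omega) :=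
    PySem.List.pyGetD_eq_getElem (B.take m) 0 hx.1 (by omega)
  rw [h1, h2, List.getElem_take]

-- A's prefix-sum fill: invariant characterization of the foldl of set-operations
theorem pv_presum_fold (A : List Int) (n : Nat) (hn : n ≤ A.length) :
    ∀ (fuel k : Nat) (l : List Int), n ≤ k + fuel → l.length = n → 1 ≤ k →
    (∀ j : Nat, j < k → j < n → PySem.List.pyGetD l (j : Int) 0 = pvPre A (j + 1)) →
    ((PySem.List.pyRange (k : Int) (n : Int)).foldl
        (fun p i => PySem.List.pySetD p i (PySem.List.pyGetD p (i - 1) 0 + PySem.List.pyGetD A i 0)) l).length = n ∧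
    ∀ j : Nat, j < n → PySem.List.pyGetD
        ((PySem.List.pyRange (k : Int) (n : Int)).foldl
          (fun p i => PySem.List.pySetD p i (PySem.List.pyGetD p (i - 1) 0 + PySem.List.pyGetD A i 0)) l)
        (j : Int) 0 = pvPre A (j + 1) := by
  intro fuel
  induction fuel with
  | zero =>
    intro k l hnk hl hk hinv
    rw [PySem.List.pyRange_one_eq_nil (by exact_mod_cast hnk)]
    exact ⟨hl, fun j hj => hinv j (by omega) hj⟩
  | succ fuel ih =>
    intro k l hnk hl hk hinv
    by_cases hkn : n ≤ k
    · rw [PySem.List.pyRange_one_eq_nil (by exact_mod_cast hkn)]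
      exact ⟨hl, fun j hj => hinv j (by omega) hj⟩
    · push_neg at hkn
      rw [PySem.List.pyRange_one_cons (by exact_mod_cast hkn)]
      rw [List.foldl_cons]
      have hcast : ((k : Int) + 1) = ((k + 1 : Nat) : Int) := by push_cast; ring
      rw [hcast]
      set v := PySem.List.pyGetD l ((k : Int) - 1) 0 + PySem.List.pyGetD A (k : Int) 0 with hv
      have hvval : v = pvPre A (k + 1) := by
        have hc1 : ((k : Int) - 1) = (((k - 1 : Nat)) : Int) := by omega
        have h1 : PySem.List.pyGetD l ((k : Int) - 1) 0 = pvPre A k := by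
          rw [hc1, hinv (k - 1) (by omega) (by omega)]
          congr 1
          omega
        have h2 : PySem.List.pyGetD A (k : Int) 0 = A[k]'(by omega) := by
          have := PySem.List.pyGetD_eq_getElem A (i := (k : Int)) 0 (by omega) (by exact_mod_cast (by omega : k < A.length))
          simpa using this
        rw [hv, h1, h2, pvPre_succ A k (by omega)]
      apply ih (k + 1) _ (by omega) (by rw [PySem.List.length_pySetD]; exact hl) (by omega)
      intro j hj hjn
      have hset := PySem.List.pyGetD_pySetD_natCast l k j v 0 (by omega)
      rw [hset]
      by_cases hjk : j = k
      · rw [if_pos hjk, hvval, hjk]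
      · rw [if_neg hjk]
        exact hinv j (by omega) hjn

-- A's suffix-sum fill: the fold over range(k-1, -1, -1) fills positions below k
theorem pv_sufsum_fold (A : List Int) (n : Nat) (hn : n ≤ A.length) (hn1 : 1 ≤ n) :
    ∀ (k : Nat) (l : List Int), k ≤ n - 1 → l.length = n →
    (∀ j : Nat, k ≤ j → j < n → PySem.List.pyGetD l (j : Int) 0 = pvPre A n - pvPre A j) →
    ((PySem.List.pyRange ((k : Int) - 1) (-1) (-1)).foldl
        (fun s i => PySem.List.pySetD s i (PySem.List.pyGetD s (i + 1) 0 + PySem.List.pyGetD A i 0)) l).length = n ∧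
    ∀ j : Nat, j < n → PySem.List.pyGetD
        ((PySem.List.pyRange ((k : Int) - 1) (-1) (-1)).foldl
          (fun s i => PySem.List.pySetD s i (PySem.List.pyGetD s (i + 1) 0 + PySem.List.pyGetD A i 0)) l)
        (j : Int) 0 = pvPre A n - pvPre A j := by
  intro k
  induction k with
  | zero =>
    intro l _ hl hinv
    rw [PySem.List.pyRange_neg_one_eq_nil (by omega)]
    exact ⟨hl, fun j hj => hinv j (by omega) hj⟩
  | succ k ih =>
    intro l hk hl hinv
    have hcast : ((k + 1 : Nat) : Int) - 1 = (k : Int) := by push_cast; ring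
    rw [hcast, PySem.List.pyRange_neg_one_cons (by omega), List.foldl_cons]
    set v := PySem.List.pyGetD l ((k : Int) + 1) 0 + PySem.List.pyGetD A (k : Int) 0 with hv
    have hvval : v = pvPre A n - pvPre A k := by
      have hc1 : ((k : Int) + 1) = (((k + 1 : Nat)) : Int) := by push_cast; ring
      have h1 : PySem.List.pyGetD l ((k : Int) + 1) 0 = pvPre A n - pvPre A (k + 1) := by
        rw [hc1, hinv (k + 1) (by omega) (by omega)]
      have h2 : PySem.List.pyGetD A (k : Int) 0 = A[k]'(by omega) := by
        have := PySem.List.pyGetD_eq_getElem A (i := (k : Int)) 0 (by omega) (by exact_mod_cast (by omega : k < A.length))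
        simpa using this
      rw [hv, h1, h2, pvPre_succ A k (by omega)]
      ring
    apply ih _ (by omega) (by rw [PySem.List.length_pySetD]; exact hl)
    intro j hj hjn
    have hset := PySem.List.pyGetD_pySetD_natCast l k j v 0 (by omega)
    rw [hset]
    by_cases hjk : j = k
    · rw [if_pos hjk, hvval, hjk]
    · rw [if_neg hjk]
      exact hinv j (by omega) hjn

-- characterization of A's prefix-sum array
theorem pvPreArr_get (A : List Int) (N : Int) (hN1 : 1 ≤ N) (hNA : N ≤ (A.length : Int)) :
    ∀ j : Nat, j < N.toNat → PySem.List.pyGetD (pvPreArr A N) (j : Int) 0 = pvPre A (j + 1) := by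
  intro j hj
  unfold pvPreArr
  rw [PySem.List.pyRepeat_singleton]
  have hseed : ∀ jj : Nat, jj < 1 → jj < N.toNat →
      PySem.List.pyGetD (PySem.List.pySetD (List.replicate N.toNat (0 : Int)) 0 (PySem.List.pyGetD A 0 0)) (jj : Int) 0
        = pvPre A (jj + 1) := by
    intro jj hjj _
    have hjj0 : jj = 0 := by omega
    subst hjj0
    obtain ⟨kk, hkk⟩ : ∃ kk, N.toNat = kk + 1 := ⟨N.toNat - 1, by omega⟩
    rw [hkk, List.replicate_succ, PySem.List.pySetD_of_nonneg _ _ (by omega)]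
    have hA0 : PySem.List.pyGetD A 0 0 = A[0]'(by omega) := by
      have := PySem.List.pyGetD_eq_getElem A (i := (0 : Int)) 0 (by omega) (by omega)
      simpa using this
    have h1 : pvPre A (0 + 1) = A[0]'(by omega) := by
      rw [pvPre_succ A 0 (by omega), pvPre_zero]
      omega
    simp [hA0, h1]
  have h := pv_presum_fold A N.toNat (by omega) N.toNat 1
      (PySem.List.pySetD (List.replicate N.toNat (0 : Int)) 0 (PySem.List.pyGetD A 0 0))
      (by omega) (by rw [PySem.List.length_pySetD]; simp) (by omega) hseed
  have e1 : ((1 : Nat) : Int) = 1 := by simp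
  have e2 : ((N.toNat : Nat) : Int) = N := by omega
  rw [e1, e2] at h
  exact h.2 j hj

-- characterization of A's suffix-sum array
theorem pvSufArr_get (A : List Int) (N : Int) (hN1 : 1 ≤ N) (hNA : N ≤ (A.length : Int)) :
    ∀ j : Nat, j < N.toNat → PySem.List.pyGetD (pvSufArr A N) (j : Int) 0 = pvPre A N.toNat - pvPre A j := by
  intro j hj
  unfold pvSufArr
  rw [PySem.List.pyRepeat_singleton]
  have hc1 : N - 1 = ((N.toNat - 1 : Nat) : Int) := by omega
  have hc2 : N - 2 = ((N.toNat - 1 : Nat) : Int) - 1 := by omega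
  rw [hc1, hc2]
  have hseed : ∀ jj : Nat, N.toNat - 1 ≤ jj → jj < N.toNat →
      PySem.List.pyGetD
        (PySem.List.pySetD (List.replicate N.toNat (0 : Int)) ((N.toNat - 1 : Nat) : Int)
          (PySem.List.pyGetD A ((N.toNat - 1 : Nat) : Int) 0)) (jj : Int) 0
        = pvPre A N.toNat - pvPre A jj := by
    intro jj h1 h2
    have hjj : jj = N.toNat - 1 := by omega
    subst hjj
    rw [PySem.List.pyGetD_pySetD_natCast _ _ _ _ _ (by simp; omega), if_pos rfl]
    have hA1 : PySem.List.pyGetD A ((N.toNat - 1 : Nat) : Int) 0 = A[N.toNat - 1]'(by omega) := by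
      have := PySem.List.pyGetD_eq_getElem A (i := ((N.toNat - 1 : Nat) : Int)) 0 (by omega)
          (by exact_mod_cast (by omega : N.toNat - 1 < A.length))
      simpa using this
    have hstep := pvPre_succ A (N.toNat - 1) (by omega)
    have hns : N.toNat - 1 + 1 = N.toNat := by omega
    rw [hns] at hstep
    rw [hA1]
    omega
  have h := pv_sufsum_fold A N.toNat (by omega) (by omega) (N.toNat - 1)
      (PySem.List.pySetD (List.replicate N.toNat (0 : Int)) ((N.toNat - 1 : Nat) : Int)
        (PySem.List.pyGetD A ((N.toNat - 1 : Nat) : Int) 0))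
      (by omega) (by rw [PySem.List.length_pySetD]; simp) hseed
  exact h.2 j hj

-- A's value as a sum of pvG over the first M queries
theorem pv_A_eq (A B : List Int) (N M : Int) (hN1 : 1 ≤ N) (hNA : N ≤ (A.length : Int))
    (hMB : M ≤ (B.length : Int)) (hBq : ∀ b ∈ B.take M.toNat, 0 ≤ b ∧ b < N) :
    score_of_sorted_array A B N M = ((B.take M.toNat).map (pvG A N.toNat)).sum := by
  rw [pv_A_unfold, pv_pyRange_zero_toNat M]
  have hft := pv_fold_take B M.toNat (by omega)
      (fun r b => r + PySem.List.pyGetD (pvSufArr A N) b 0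
        - PySem.List.pyGetD (pvPreArr A N) (N - b - 1) 0) (0 : Int)
  beta_reduce at hft
  rw [hft]
  refine Eq.trans (b := (B.take M.toNat).foldl (fun r b => r + pvG A N.toNat b) 0) ?_ ?_
  · apply PySem.List.foldl_congr_mem
    intro acc b hb
    obtain ⟨hb0, hbn⟩ := hBq b hb
    have hbc : b = ((b.toNat : Nat) : Int) := by omega
    have h1 : PySem.List.pyGetD (pvSufArr A N) b 0 = pvPre A N.toNat - pvPre A b.toNat := by
      rw [hbc]
      exact pvSufArr_get A N hN1 hNA b.toNat (by omega)
    have h2 : PySem.List.pyGetD (pvPreArr A N) (N - b - 1) 0 = pvPre A (N.toNat - b.toNat) := by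
      have hc : N - b - 1 = ((N.toNat - b.toNat - 1 : Nat) : Int) := by omega
      rw [hc, pvPreArr_get A N hN1 hNA (N.toNat - b.toNat - 1) (by omega)]
      congr 1
      omega
    rw [h1, h2]
    unfold pvG
    ring
  · rw [PySem.List.foldl_add]
    omega

-- ===== B-side lemmas =====

-- the histogram fold: each processed query b with 0 ≤ b < n bumps slot b by one
theorem pv_cnt_fold (n : Nat) :
    ∀ (Bq l : List Int), l.length = n → (∀ b ∈ Bq, 0 ≤ b ∧ b < (n : Int)) →
    (Bq.foldl (fun c b => PySem.List.pySetD c b (PySem.List.pyGetD c b 0 + 1)) l).length = n ∧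
    ∀ v : Nat, v < n →
      PySem.List.pyGetD (Bq.foldl (fun c b => PySem.List.pySetD c b (PySem.List.pyGetD c b 0 + 1)) l) (v : Int) 0
        = PySem.List.pyGetD l (v : Int) 0 + ((Bq.count ((v : Nat) : Int) : Nat) : Int) := by
  intro Bq
  induction Bq with
  | nil =>
    intro l hl _
    refine ⟨hl, fun v hv => by simp⟩
  | cons b Bq ih =>
    intro l hl hq
    obtain ⟨hb0, hbn⟩ := hq b (by simp)
    have hbc : b = ((b.toNat : Nat) : Int) := by omega
    rw [List.foldl_cons]
    set l' := PySem.List.pySetD l b (PySem.List.pyGetD l b 0 + 1) with hl'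
    have hl'len : l'.length = n := by rw [hl', PySem.List.length_pySetD]; exact hl
    have hget : ∀ v : Nat, v < n → PySem.List.pyGetD l' (v : Int) 0
        = PySem.List.pyGetD l (v : Int) 0 + (if v = b.toNat then 1 else 0) := by
      intro v hv
      have hset : l' = PySem.List.pySetD l ((b.toNat : Nat) : Int) (PySem.List.pyGetD l b 0 + 1) := by
        rw [hl', ← hbc]
      rw [hset, PySem.List.pyGetD_pySetD_natCast l b.toNat v _ 0 (by omega)]
      by_cases hvb : v = b.toNat
      · subst hvb
        rw [if_pos rfl, if_pos rfl, ← hbc]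
      · rw [if_neg hvb, if_neg hvb]
        omega
    obtain ⟨hlen2, hval2⟩ := ih l' hl'len (fun x hx => hq x (by simp [hx]))
    refine ⟨hlen2, fun v hv => ?_⟩
    rw [hval2 v hv, hget v hv]
    simp only [List.count_cons, beq_iff_eq]
    push_cast
    split_ifs <;> omega

-- the histogram list equals the explicit count table
theorem pvCntArr_eq (B : List Int) (N M : Int) (hN0 : 0 ≤ N) (hMB : M ≤ (B.length : Int))
    (hBq : ∀ b ∈ B.take M.toNat, 0 ≤ b ∧ b < N) :
    pvCntArr B N M
      = (List.range N.toNat).map (fun v => (((B.take M.toNat).count ((v : Nat) : Int) : Nat) : Int)) := by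
  unfold pvCntArr
  rw [PySem.List.pyRepeat_singleton, pv_pyRange_zero_toNat M]
  have hft := pv_fold_take B M.toNat (by omega)
      (fun c b => PySem.List.pySetD c b (PySem.List.pyGetD c b 0 + 1))
      (List.replicate N.toNat (0 : Int))
  beta_reduce at hft
  rw [hft]
  have hq : ∀ b ∈ B.take M.toNat, 0 ≤ b ∧ b < ((N.toNat : Nat) : Int) := by
    intro b hb; have := hBq b hb; omega
  obtain ⟨hlen, hval⟩ := pv_cnt_fold N.toNat (B.take M.toNat)
      (List.replicate N.toNat (0 : Int)) (by simp) hq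
  apply List.ext_getElem (by rw [hlen]; simp)
  intro v h1 h2
  have hv : v < N.toNat := by simpa using h2
  have hrepl : PySem.List.pyGetD (List.replicate N.toNat (0 : Int)) (v : Int) 0 = 0 := by
    rw [PySem.List.pyGetD_eq_getElem _ 0 (by omega) (by simp; omega)]
    simp
  have hfin : PySem.List.pyGetD ((B.take M.toNat).foldl
      (fun c b => PySem.List.pySetD c b (PySem.List.pyGetD c b 0 + 1))
      (List.replicate N.toNat (0 : Int))) ((v : Nat) : Int) 0
      = (((B.take M.toNat).count ((v : Nat) : Int) : Nat) : Int) := by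
    rw [hval v hv, hrepl]
    ring
  rw [PySem.List.pyGetD_eq_getElem _ 0 (by omega) (by simp [hlen]; omega)] at hfin
  simpa using hfin

-- the running-sum fold builds the list of prefix sums of its input
theorem pv_cumsum_fold (l : List Int) :
    l.foldl (fun (p : List Int × Int) v => (p.1 ++ [p.2 + v], p.2 + v)) ([], 0)
      = ((List.range l.length).map (fun k => (l.take (k + 1)).sum), l.sum) := by
  induction l using List.reverseRecOn with
  | nil => simp
  | append_singleton l x ih =>
    rw [List.foldl_append, ih]
    simp only [List.foldl_cons, List.foldl_nil]
    simp only [Prod.mk.injEq]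
    constructor
    · rw [List.length_append, List.length_singleton, List.range_succ, List.map_append]
      congr 1
      · apply List.map_congr_left
        intro k hk
        rw [List.mem_range] at hk
        rw [List.take_append_of_le_length (by omega)]
      · simp
    · simp

-- a 0/1 indicator sum over range k, for a nonnegative b
theorem pv_ind_sum (b : Int) (hb : 0 ≤ b) :
    ∀ k : Nat, ((List.range k).map (fun v => if b = ((v : Nat) : Int) then (1 : Int) else 0)).sum
      = if b ≤ (k : Int) - 1 then 1 else 0 := by
  intro k
  induction k with
  | zero => simp; omega
  | succ k ih =>
    rw [List.range_succ, List.map_append, List.sum_append, ih]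
    simp only [List.map_singleton, List.sum_singleton]
    push_cast
    split_ifs <;> omega

-- sum of the first k histogram slots = number of queries with value < k
theorem pv_sumcount (Bq : List Int) (hq : ∀ b ∈ Bq, 0 ≤ b) :
    ∀ k : Nat, ((List.range k).map (fun v => ((Bq.count ((v : Nat) : Int) : Nat) : Int))).sum
      = pvK Bq ((k : Int) - 1) := by
  induction Bq with
  | nil => intro k; simp [pvK]
  | cons b Bq ih =>
    intro k
    have hb0 : 0 ≤ b := hq b (by simp)
    have hstep : (List.range k).map (fun v => (((b :: Bq).count ((v : Nat) : Int) : Nat) : Int))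
        = (List.range k).map (fun v => ((Bq.count ((v : Nat) : Int) : Nat) : Int)
            + (if b = ((v : Nat) : Int) then (1 : Int) else 0)) := by
      apply List.map_congr_left
      intro v _
      simp only [List.count_cons, beq_iff_eq]
      push_cast
      split_ifs <;> omega
    rw [hstep, PySem.List.sum_map_add_int, ih (fun x hx => hq x (by simp [hx])) k,
        pv_ind_sum b hb0 k]
    unfold pvK
    simp only [List.countP_cons, decide_eq_true_eq]
    split_ifs <;> push_cast <;> omega

-- sum of a pointwise difference
theorem pv_sum_map_sub {α : Type} (l : List α) (f g : α → Int) :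
    (l.map (fun x => f x - g x)).sum = (l.map f).sum - (l.map g).sum := by
  induction l with
  | nil => simp
  | cons a l ih => simp [ih]; ring

-- total: sum of A.getD over range n is the n-th prefix sum
theorem pv_sum_getD (A : List Int) :
    ∀ n : Nat, n ≤ A.length → ((List.range n).map (fun j => A.getD j 0)).sum = pvPre A n := by
  intro n
  induction n with
  | zero => intro _; simp [pvPre]
  | succ n ih =>
    intro hn
    rw [List.range_succ, List.map_append, List.sum_append, ih (by omega)]
    simp only [List.map_singleton, List.sum_singleton]
    rw [List.getD_eq_getElem A 0 (by omega), pvPre_succ A n (by omega)]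

-- truncated: sum of A.getD over j < k (within range n) is the k-th prefix sum
theorem pv_sum_getD_lt (A : List Int) (k : Nat) :
    ∀ n : Nat, k ≤ n → n ≤ A.length →
    ((List.range n).map (fun j => if j < k then A.getD j 0 else 0)).sum = pvPre A k := by
  intro n
  induction n with
  | zero => intro hk _; have : k = 0 := by omega
            subst this; simp [pvPre]
  | succ n ih =>
    intro hk hn
    rw [List.range_succ, List.map_append, List.sum_append]
    by_cases hkn : k ≤ n
    · rw [ih hkn (by omega)]
      simp only [List.map_singleton, List.sum_singleton]
      rw [if_neg (by omega)]
      ring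
    · have hk1 : k = n + 1 := by omega
      subst hk1
      have hcg : (List.range n).map (fun j => if j < n + 1 then A.getD j 0 else 0)
          = (List.range n).map (fun j => A.getD j 0) := by
        apply List.map_congr_left
        intro j hj
        rw [List.mem_range] at hj
        rw [if_pos (by omega)]
      rw [hcg, pv_sum_getD A n (by omega)]
      simp only [List.map_singleton, List.sum_singleton]
      rw [if_pos (by omega), List.getD_eq_getElem A 0 (by omega), pvPre_succ A n (by omega)]

-- the weighted indicator sum for a single query equals its pvG contribution
theorem pv_single (A : List Int) (n : Nat) (hn : n ≤ A.length) (b : Int)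
    (hb0 : 0 ≤ b) (hbn : b < (n : Int)) :
    ((List.range n).map (fun j => A.getD j 0 *
        ((if b ≤ ((j : Nat) : Int) then (1 : Int) else 0)
          - (if b ≤ (n : Int) - 1 - ((j : Nat) : Int) then (1 : Int) else 0)))).sum
      = pvG A n b := by
  have hcg : (List.range n).map (fun j => A.getD j 0 *
        ((if b ≤ ((j : Nat) : Int) then (1 : Int) else 0)
          - (if b ≤ (n : Int) - 1 - ((j : Nat) : Int) then (1 : Int) else 0)))
      = (List.range n).map (fun j =>
          (A.getD j 0 - (if j < b.toNat then A.getD j 0 else 0))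
            - (if j < n - b.toNat then A.getD j 0 else 0)) := by
    apply List.map_congr_left
    intro j hj
    rw [List.mem_range] at hj
    split_ifs <;> (try (exfalso; omega)) <;> ring
  rw [hcg, pv_sum_map_sub, pv_sum_map_sub, pv_sum_getD A n hn,
      pv_sum_getD_lt A b.toNat n (by omega) hn, pv_sum_getD_lt A (n - b.toNat) n (by omega) hn]
  unfold pvG
  ring

-- exchanging the order of summation: the coefficient sum equals the per-query sum
theorem pv_exchange (A : List Int) (n : Nat) (hn : n ≤ A.length) :
    ∀ Bq : List Int, (∀ b ∈ Bq, 0 ≤ b ∧ b < (n : Int)) →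
    ((List.range n).map (fun j => A.getD j 0 *
        (pvK Bq ((j : Nat) : Int) - pvK Bq ((n : Int) - 1 - ((j : Nat) : Int))))).sum
      = (Bq.map (pvG A n)).sum := by
  intro Bq
  induction Bq with
  | nil => intro _; simp [pvK]
  | cons b Bq ih =>
    intro hq
    obtain ⟨hb0, hbn⟩ := hq b (by simp)
    have hKstep : ∀ t : Int, pvK (b :: Bq) t = pvK Bq t + (if b ≤ t then 1 else 0) := by
      intro t
      unfold pvK
      simp only [List.countP_cons, decide_eq_true_eq]
      split_ifs <;> push_cast <;> omega
    have hcg : (List.range n).map (fun j => A.getD j 0 *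
          (pvK (b :: Bq) ((j : Nat) : Int) - pvK (b :: Bq) ((n : Int) - 1 - ((j : Nat) : Int))))
        = (List.range n).map (fun j =>
            A.getD j 0 * (pvK Bq ((j : Nat) : Int) - pvK Bq ((n : Int) - 1 - ((j : Nat) : Int)))
            + A.getD j 0 * ((if b ≤ ((j : Nat) : Int) then (1 : Int) else 0)
                - (if b ≤ (n : Int) - 1 - ((j : Nat) : Int) then (1 : Int) else 0))) := by
      apply List.map_congr_left
      intro j _
      rw [hKstep, hKstep]
      ring
    rw [hcg, PySem.List.sum_map_add_int, ih (fun x hx => hq x (by simp [hx])),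
        pv_single A n hn b hb0 hbn]
    simp
    ring
  
-- the (j)-th entry of a map over range
theorem pv_mapRange_get (g : Nat → Int) (n j : Nat) (hj : j < n) :
    PySem.List.pyGetD ((List.range n).map g) (j : Int) 0 = g j := by
  have hlen : ((List.range n).map g).length = n := by simp
  rw [PySem.List.pyGetD_eq_getElem _ 0 (by omega) (by rw [hlen]; exact_mod_cast hj)]
  simp

-- B's value as the same sum of pvG over the first M queries
theorem pv_B_eq (A B : List Int) (N M : Int) (hN1 : 1 ≤ N) (hNA : N ≤ (A.length : Int))
    (hMB : M ≤ (B.length : Int)) (hBq : ∀ b ∈ B.take M.toNat, 0 ≤ b ∧ b < N) :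
    score_of_sorted_array_alt A B N M = ((B.take M.toNat).map (pvG A N.toNat)).sum := by
  rw [pv_B_unfold]
  set n := N.toNat with hn
  set Bq := B.take M.toNat with hBqdef
  have hq0 : ∀ b ∈ Bq, 0 ≤ b := fun b hb => (hBq b hb).1
  rw [pvCntArr_eq B N M (by omega) hMB hBq, pv_cumsum_fold]
  set cntl := (List.range n).map (fun v => ((Bq.count ((v : Nat) : Int) : Nat) : Int)) with hcntl
  have hcntlen : cntl.length = n := by simp [hcntl]
  -- C's entry at k (< n) is pvK Bq k
  have hCget : ∀ k : Nat, k < n →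
      PySem.List.pyGetD ((List.range cntl.length).map (fun k => (cntl.take (k + 1)).sum)) (k : Int) 0
        = pvK Bq ((k : Nat) : Int) := by
    intro k hk
    rw [hcntlen, pv_mapRange_get _ n k hk]
    have htake : cntl.take (k + 1)
        = (List.range (k + 1)).map (fun v => ((Bq.count ((v : Nat) : Int) : Nat) : Int)) := by
      rw [hcntl, ← List.map_take, List.take_range,
          min_eq_left (by omega : k + 1 ≤ n)]
    rw [htake, pv_sumcount Bq hq0 (k + 1)]
    congr 1
    push_cast
    ring
  -- the final loop over range(N) as a sum over range n
  rw [pv_pyRange_zero_toNat N, ← hn, PySem.List.pyRange_one]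
  simp only [sub_zero, zero_add, Int.toNat_natCast]
  rw [List.foldl_map, PySem.List.foldl_add, zero_add]
  have hmain := pv_exchange A n (by omega) Bq (fun b hb => by have := hBq b hb; omega)
  rw [← hmain]
  apply congrArg List.sum
  apply List.map_congr_left
  intro j hj
  rw [List.mem_range] at hj
  have hA : PySem.List.pyGetD A ((j : Nat) : Int) 0 = A.getD j 0 := by
    rw [PySem.List.pyGetD_eq_getElem A 0 (by omega) (by exact_mod_cast (by omega : j < A.length))]
    rw [List.getD_eq_getElem A 0 (by omega)]
    simp
  have h1 := hCget j hj
  have hidx : N - ((j : Nat) : Int) - 1 = ((n - 1 - j : Nat) : Int) := by omega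
  have h2 := hCget (n - 1 - j) (by omega)
  rw [hA, h1, hidx, h2,
      (by omega : ((n - 1 - j : Nat) : Int) = (n : Int) - 1 - ((j : Nat) : Int))]

-- ===== VERDICT (by name: the statement is the Claim_ definition above) =====
theorem score_of_sorted_array_spec : Claim_equal_score_of_sorted_array := by
  intro A B N M _ hpre
  obtain ⟨hN1, hNA, hMB, hBq⟩ := hpre
  unfold Spec_score_of_sorted_array
  rw [pv_A_eq A B N M hN1 hNA hMB hBq, pv_B_eq A B N M hN1 hNA hMB hBq]
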